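-- pv_equiv track=rewrite | github.com/selmiss/DQ-Former | utils/patching_preprocess.py | fixed_length_ids
-- ===== SOURCE A (Python) =====
-- from typing import List
--
-- def fixed_length_ids(n_atoms: int, seg_len: int = 3) -> List[int]:
--     """
--     Produce fragment IDs by slicing atoms into contiguous blocks of seg_len.
--     Example (n=8, seg_len=3) -> [0,0,0,1,1,1,2,2]
--     """
--     if n_atoms <= 0:
--         return []
--     seg_len = max(1, int(seg_len))
--     ids = []
--     cur = 0
--     gid = 0
--     while cur < n_atoms:
--         run = min(seg_len, n_atoms - cur)
--         ids.extend([gid] * run)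
--         gid += 1
--         cur += run
--     return ids
-- ===== SOURCE B (Python) =====
-- from typing import List
--
-- def fixed_length_ids(n_atoms: int, seg_len: int = 3) -> List[int]:
--     if n_atoms <= 0:
--         return []
--     seg_len = max(1, int(seg_len))
--     return [i // seg_len for i in range(n_atoms)]
-- ===== Notes on version B (the rewrite author's own statement) =====
-- stated objective: idiomatic
-- what changed: Replaces A's group-by-group run-building while-loop (cursor + extend of replicated blocks) with a single comprehension over atom indices using the closed-form id i // seg_len.
import Mathlib
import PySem

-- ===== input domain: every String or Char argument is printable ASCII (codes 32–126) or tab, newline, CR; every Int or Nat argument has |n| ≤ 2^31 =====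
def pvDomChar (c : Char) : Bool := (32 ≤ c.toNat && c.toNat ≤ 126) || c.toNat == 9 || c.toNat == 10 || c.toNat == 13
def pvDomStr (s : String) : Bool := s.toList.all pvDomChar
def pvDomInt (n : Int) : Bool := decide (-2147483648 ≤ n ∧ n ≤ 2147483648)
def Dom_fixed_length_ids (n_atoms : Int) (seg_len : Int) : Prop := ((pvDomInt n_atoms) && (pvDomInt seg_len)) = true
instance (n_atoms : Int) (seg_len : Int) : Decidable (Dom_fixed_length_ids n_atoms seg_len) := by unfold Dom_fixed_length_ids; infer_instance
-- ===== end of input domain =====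

-- B replaces A's run-building while-loop with an idiomatic one-pass closed-form comprehension (i // seg_len); same cost, plainer code.

-- ===== PORT A =====
-- the while-loop of A: state (cur, gid, ids); fuel only totalizes the loop (n_atoms iterations always suffice since each run ≥ 1)
def pvLoopA (s n cur gid : Int) (ids : List Int) : Nat → List Int
  | 0 => ids
  | fuel + 1 =>
    if cur < n then
      let run := min s (n - cur)
      pvLoopA s n (cur + run) (gid + 1) (ids ++ List.replicate run.toNat gid) fuel
    else ids

def fixed_length_ids (n_atoms : Int) (seg_len : Int) : List Int :=
  if n_atoms ≤ 0 then []
  else pvLoopA (max 1 seg_len) n_atoms 0 0 [] n_atoms.toNat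

-- ===== PORT B =====
def fixed_length_ids_alt (n_atoms : Int) (seg_len : Int) : List Int :=
  if n_atoms ≤ 0 then []
  else (PySem.List.pyRange 0 n_atoms 1).map (fun i => PySem.Int.floordiv i (max 1 seg_len))

-- ===== PRECONDITION & SPEC =====
def Spec_fixed_length_ids (n_atoms : Int) (seg_len : Int) (out : List Int) : Prop := out = fixed_length_ids_alt n_atoms seg_len
instance (n_atoms : Int) (seg_len : Int) (out : List Int) : Decidable (Spec_fixed_length_ids n_atoms seg_len out) := by unfold Spec_fixed_length_ids; infer_instance

-- ===== CLAIM (what is proved, stated in full; the proofs are below) =====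
def Claim_equal_fixed_length_ids : Prop := ∀ (n_atoms : Int) (seg_len : Int), Dom_fixed_length_ids n_atoms seg_len → Spec_fixed_length_ids n_atoms seg_len (fixed_length_ids n_atoms seg_len)

-- ===== LEMMAS AND PROOFS =====

-- one block of A: every index in [gid*s, gid*s + r) has floordiv = gid
lemma pvBlock_map (s gid r : Int) (hs : 1 ≤ s) (hrs : r ≤ s) :
    (PySem.List.pyRange (gid * s) (gid * s + r) 1).map (fun i => PySem.Int.floordiv i s)
      = List.replicate r.toNat gid := by
  rw [show r.toNat = ((PySem.List.pyRange (gid * s) (gid * s + r) 1).map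
        (fun i => PySem.Int.floordiv i s)).length by
      simp [PySem.List.length_pyRange_one]]
  apply List.eq_replicate_of_mem
  intro b hb
  simp only [List.mem_map] at hb
  obtain ⟨i, hi, rfl⟩ := hb
  rw [PySem.List.mem_pyRange_one] at hi
  rw [PySem.Int.floordiv_eq_iff_of_pos (by omega)]
  have : (gid + 1) * s = gid * s + s := by ring
  omega

lemma pvLoopA_eq (s n : Int) (hs : 1 ≤ s) :
    ∀ (fuel : Nat) (cur gid : Int) (ids : List Int),
      (cur = gid * s ∨ n ≤ cur) → (n - cur).toNat ≤ fuel →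
      pvLoopA s n cur gid ids fuel
        = ids ++ (PySem.List.pyRange cur n 1).map (fun i => PySem.Int.floordiv i s) := by
  intro fuel
  induction fuel with
  | zero =>
    intro cur gid ids _ hf
    have : n ≤ cur := by omega
    simp [pvLoopA, PySem.List.pyRange_one_eq_nil this]
  | succ fuel ih =>
    intro cur gid ids hinv hf
    by_cases hcn : cur < n
    · have hcg : cur = gid * s := hinv.resolve_right (fun h => absurd hcn (not_lt.mpr h))
      have hrun1 : (1:Int) ≤ min s (n - cur) := by omega
      have hruns : min s (n - cur) ≤ s := min_le_left _ _
      simp only [pvLoopA, if_pos hcn]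
      rw [ih (cur + min s (n - cur)) (gid + 1) _ ?_ (by omega)]
      · rw [PySem.List.pyRange_one_append cur (cur + min s (n - cur)) n (by omega) (by omega),
          List.map_append, List.append_assoc]
        congr 1
        subst hcg
        exact congrArg (· ++ _) (pvBlock_map s gid _ hs hruns).symm
      · by_cases h : min s (n - cur) = s
        · left; rw [h, hcg]; ring
        · right; omega
    · simp [pvLoopA, hcn, PySem.List.pyRange_one_eq_nil (by omega : n ≤ cur)]

-- ===== VERDICT (by name: the statement is the Claim_ definition above) =====
theorem fixed_length_ids_spec : Claim_equal_fixed_length_ids := by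
  intro n s _
  unfold Spec_fixed_length_ids fixed_length_ids fixed_length_ids_alt
  by_cases hn : n ≤ 0
  · simp [hn]
  · simp only [if_neg hn]
    rw [pvLoopA_eq (max 1 s) n (le_max_left _ _) n.toNat 0 0 [] (Or.inl (by ring)) (by omega)]
    simp
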